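-- pv_equiv track=rewrite | github.com/LoggeL/MelodAI | src/utils/helpers.py | _adjust_line_breaks
-- ===== SOURCE A (Python) =====
-- def _adjust_line_breaks(line_breaks, removed_indices):
--     """Adjust line break ASR indices after removing compound fragment words."""
--     if not removed_indices:
--         return line_breaks
--
--     removed_sorted = sorted(removed_indices)
--     adjusted = []
--     for lb in line_breaks:
--         if lb in removed_indices:
--             continue
--         shift = sum(1 for r in removed_sorted if r < lb)
--         adjusted.append(lb - shift)
--     return adjusted
-- ===== SOURCE B (Python) =====
-- def _adjust_line_breaks(line_breaks, removed_indices):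
--     """Adjust line break ASR indices after removing compound fragment words."""
--     if not removed_indices:
--         return line_breaks
--
--     removed_sorted = sorted(removed_indices)
--     removed_set = set(removed_sorted)
--     out = []
--     for lb in line_breaks:
--         if lb not in removed_set:
--             # binary search: number of removed entries strictly below lb
--             lo, hi = 0, len(removed_sorted)
--             while lo < hi:
--                 mid = (lo + hi) // 2
--                 if removed_sorted[mid] < lb:
--                     lo = mid + 1
--                 else:
--                     hi = mid
--             out.append(lb - lo)
--     return out
-- ===== Notes on version B (the rewrite author's own statement) =====
-- stated objective: faster
-- what changed: Replaces the per-line-break linear membership test and linear counting scan over removed indices with a hash-set membership test and a hand-written binary search (bisect_left) over the sorted removed list.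
import Mathlib
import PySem

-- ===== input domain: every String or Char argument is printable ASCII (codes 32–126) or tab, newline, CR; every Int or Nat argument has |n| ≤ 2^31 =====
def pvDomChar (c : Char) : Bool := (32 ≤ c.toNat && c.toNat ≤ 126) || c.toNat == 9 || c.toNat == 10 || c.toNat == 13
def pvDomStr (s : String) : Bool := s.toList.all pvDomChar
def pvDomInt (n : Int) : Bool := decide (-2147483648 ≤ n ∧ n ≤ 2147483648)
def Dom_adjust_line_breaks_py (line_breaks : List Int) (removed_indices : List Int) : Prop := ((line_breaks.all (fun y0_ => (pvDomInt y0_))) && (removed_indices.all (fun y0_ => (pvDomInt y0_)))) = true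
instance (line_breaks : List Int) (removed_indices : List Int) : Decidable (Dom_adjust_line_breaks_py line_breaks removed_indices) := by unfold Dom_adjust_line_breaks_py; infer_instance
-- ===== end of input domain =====

-- B replaces A's per-element linear membership test and linear count with a set and a binary search; measured faster (asymptotic).

-- ===== PORT A =====
-- literal transliteration of _adjust_line_breaks: skip lb if it occurs in removed_indices,
-- shift = sum(1 for r in removed_sorted if r < lb), append lb - shift.
def adjust_line_breaks_py (line_breaks : List Int) (removed_indices : List Int) : List Int :=
  if removed_indices = [] then line_breaks
  else
    let removed_sorted := PySem.List.sorted removed_indices (fun x => x)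
    line_breaks.foldl (fun adjusted lb =>
      if removed_indices.contains lb then adjusted
      else adjusted ++ [lb - (removed_sorted.map (fun r => if r < lb then (1 : Int) else 0)).sum]) []

-- ===== PORT B =====
-- hand-written bisect_left loop of Source B: while lo < hi: mid = (lo+hi)//2; …
-- (indexing removed_sorted[mid] is always in range — lo ≤ mid < hi ≤ length — so getD is exact there)
-- the loop variant hi - lo is the structural fuel (each iteration shrinks the interval by ≥ 1)
def pvBisectAux (a : List Int) (x : Int) : Nat → Nat → Nat → Nat
  | 0, lo, _ => lo
  | fuel + 1, lo, hi =>
    if lo < hi then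
      -- mid = (lo + hi) // 2, inlined
      if a.getD ((lo + hi) / 2) 0 < x then pvBisectAux a x fuel ((lo + hi) / 2 + 1) hi
      else pvBisectAux a x fuel lo ((lo + hi) / 2)
    else lo

def pvBisect (a : List Int) (x : Int) (lo hi : Nat) : Nat :=
  pvBisectAux a x (hi - lo) lo hi

def adjust_line_breaks_py_alt (line_breaks : List Int) (removed_indices : List Int) : List Int :=
  if removed_indices = [] then line_breaks
  else
    let removed_sorted := PySem.List.sorted removed_indices (fun x => x)
    let removed_set := PySem.Set.ofList removed_sorted
    line_breaks.foldl (fun out lb =>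
      if removed_set.contains lb then out
      else out ++ [lb - (pvBisect removed_sorted lb 0 removed_sorted.length : Int)]) []

-- ===== PRECONDITION & SPEC =====
def Spec_adjust_line_breaks_py (line_breaks : List Int) (removed_indices : List Int) (out : List Int) : Prop := out = adjust_line_breaks_py_alt line_breaks removed_indices
instance (line_breaks : List Int) (removed_indices : List Int) (out : List Int) : Decidable (Spec_adjust_line_breaks_py line_breaks removed_indices out) := by unfold Spec_adjust_line_breaks_py; infer_instance

-- ===== CLAIM (what is proved, stated in full; the proofs are below) =====
def Claim_equal_adjust_line_breaks_py : Prop := ∀ (line_breaks : List Int) (removed_indices : List Int), Dom_adjust_line_breaks_py line_breaks removed_indices → Spec_adjust_line_breaks_py line_breaks removed_indices (adjust_line_breaks_py line_breaks removed_indices)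

-- ===== LEMMAS AND PROOFS =====

-- countP of a sorted-below-boundary list: if the first k elements satisfy p and the rest do not, countP = k
lemma countP_boundary (a : List Int) (p : Int → Bool) (k : Nat) (hk : k ≤ a.length)
    (h1 : ∀ i (hi : i < a.length), i < k → p a[i]) (h2 : ∀ i (hi : i < a.length), k ≤ i → ¬ p a[i]) :
    a.countP p = k := by
  have := List.take_append_drop k a
  calc a.countP p = ((a.take k) ++ (a.drop k)).countP p := by rw [this]
    _ = (a.take k).countP p + (a.drop k).countP p := List.countP_append ..
    _ = k := by
        have ht : (a.take k).countP p = (a.take k).length := by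
          rw [List.countP_eq_length]
          intro x hx
          obtain ⟨i, hi, rfl⟩ := List.getElem_of_mem hx
          have hmin : i < min k a.length := by simpa using hi
          have hil : i < a.length := by omega
          have : (a.take k)[i] = a[i] := List.getElem_take
          rw [this]
          exact h1 i hil (by omega)
        have hd : (a.drop k).countP p = 0 := by
          rw [List.countP_eq_zero]
          intro x hx
          obtain ⟨i, hi, rfl⟩ := List.getElem_of_mem hx
          have hlen : i < a.length - k := by simpa using hi
          have : (a.drop k)[i] = a[k + i] := List.getElem_drop ..
          rw [this]
          exact h2 (k + i) (by omega) (by omega)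
        rw [ht, hd, List.length_take]
        omega

-- the binary-search loop of Source B counts the elements < x of a sorted list
lemma pvBisectAux_eq_countP (a : List Int) (x : Int) (hs : a.Pairwise (· ≤ ·)) :
    ∀ fuel lo hi, hi - lo ≤ fuel → lo ≤ hi → hi ≤ a.length →
    (∀ i (hi' : i < a.length), i < lo → a[i] < x) →
    (∀ i (hi' : i < a.length), hi ≤ i → ¬ a[i] < x) →
    pvBisectAux a x fuel lo hi = a.countP (fun r => decide (r < x)) := by
  have hmono : ∀ i j (hi : i < a.length) (hj : j < a.length), i ≤ j → a[i] ≤ a[j] := by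
    intro i j hi hj hij
    rcases Nat.lt_or_ge i j with h | h
    · exact (List.pairwise_iff_getElem.mp hs) i j hi hj h
    · have : i = j := by omega
      subst this; rfl
  have hdone : ∀ lo, lo ≤ a.length →
      (∀ i (hi' : i < a.length), i < lo → a[i] < x) →
      (∀ i (hi' : i < a.length), lo ≤ i → ¬ a[i] < x) →
      lo = a.countP (fun r => decide (r < x)) := by
    intro lo hlen hlow hhigh
    exact (countP_boundary a _ lo hlen
      (fun i hi' h => by simpa using hlow i hi' h)
      (fun i hi' h => by simpa using hhigh i hi' h)).symm
  intro fuel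
  induction fuel with
  | zero =>
    intro lo hi hf hlo hhi hlow hhigh
    have heq : lo = hi := by omega
    subst heq
    exact hdone lo (by omega) hlow hhigh
  | succ fuel ih =>
    intro lo hi hf hlo hhi hlow hhigh
    rw [pvBisectAux]
    by_cases hlt : lo < hi
    · rw [if_pos hlt]
      have hmid : (lo + hi) / 2 < a.length := by omega
      by_cases hx : a.getD ((lo + hi) / 2) 0 < x
      · rw [if_pos hx]
        rw [List.getD_eq_getElem a 0 hmid] at hx
        apply ih ((lo + hi) / 2 + 1) hi (by omega) (by omega) hhi
        · intro i hi' hilt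
          calc a[i] ≤ a[(lo + hi) / 2] := hmono i _ hi' hmid (by omega)
            _ < x := hx
        · exact hhigh
      · rw [if_neg hx]
        rw [List.getD_eq_getElem a 0 hmid] at hx
        apply ih lo ((lo + hi) / 2) (by omega) (by omega) (by omega) hlow
        intro i hi' hile hcon
        apply hx
        calc a[(lo + hi) / 2] ≤ a[i] := hmono _ i hmid hi' (by omega)
          _ < x := hcon
    · rw [if_neg hlt]
      have heq : lo = hi := by omega
      subst heq
      exact hdone lo (by omega) hlow hhigh

lemma pvBisect_eq_countP (a : List Int) (x : Int) (hs : a.Pairwise (· ≤ ·)) :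
    ∀ lo hi, lo ≤ hi → hi ≤ a.length →
    (∀ i (hi' : i < a.length), i < lo → a[i] < x) →
    (∀ i (hi' : i < a.length), hi ≤ i → ¬ a[i] < x) →
    pvBisect a x lo hi = a.countP (fun r => decide (r < x)) := by
  intro lo hi hlo hhi hlow hhigh
  exact pvBisectAux_eq_countP a x hs (hi - lo) lo hi (le_refl _) hlo hhi hlow hhigh

-- per-element: membership via the set equals membership via the raw list
lemma contains_set_eq (removed_indices : List Int) (lb : Int) :
    (PySem.Set.ofList (PySem.List.sorted removed_indices (fun x => x))).contains lb
      = removed_indices.contains lb := by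
  have hperm := PySem.List.sorted_perm removed_indices (fun x => x) false
  have h1 : lb ∈ PySem.Set.ofList (PySem.List.sorted removed_indices (fun x => x)) ↔
      lb ∈ PySem.List.sorted removed_indices (fun x => x) :=
    PySem.Set.mem_ofList _ _
  rw [Bool.eq_iff_iff, PySem.Set.contains_iff]
  simp only [List.contains_iff_mem]
  rw [h1, hperm.mem_iff]

-- per-element: the binary search returns A's 0/1 count
lemma shift_eq (removed_indices : List Int) (lb : Int) :
    ((PySem.List.sorted removed_indices (fun x => x)).map
        (fun r => if r < lb then (1 : Int) else 0)).sum
      = (pvBisect (PySem.List.sorted removed_indices (fun x => x)) lb 0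
          (PySem.List.sorted removed_indices (fun x => x)).length : Int) := by
  set a := PySem.List.sorted removed_indices (fun x => x) with ha
  have hs : a.Pairwise (· ≤ ·) := PySem.List.sorted_pairwise removed_indices (fun x => x)
  have hb := pvBisect_eq_countP a lb hs 0 a.length (Nat.zero_le _) (le_refl _)
    (fun i _ h => absurd h (Nat.not_lt_zero i)) (fun i hi' h => absurd h (by omega))
  rw [hb]
  have := PySem.List.sum_map_ite_one_zero (fun r => decide (r < lb)) a
  simpa using this

-- ===== VERDICT (by name: the statement is the Claim_ definition above) =====
theorem adjust_line_breaks_py_spec : Claim_equal_adjust_line_breaks_py := by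
  intro line_breaks removed_indices _
  unfold Spec_adjust_line_breaks_py adjust_line_breaks_py adjust_line_breaks_py_alt
  by_cases h : removed_indices = []
  · rw [if_pos h, if_pos h]
  · rw [if_neg h, if_neg h]
    show List.foldl
        (fun adjusted lb =>
          if removed_indices.contains lb = true then adjusted
          else adjusted ++ [lb - (List.map (fun r => if r < lb then (1 : Int) else 0)
            (PySem.List.sorted removed_indices (fun x => x))).sum]) [] line_breaks
      = List.foldl
        (fun out lb =>
          if (PySem.Set.ofList (PySem.List.sorted removed_indices (fun x => x))).contains lb = true then out
          else out ++ [lb - (pvBisect (PySem.List.sorted removed_indices (fun x => x)) lb 0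
            (PySem.List.sorted removed_indices (fun x => x)).length : Int)]) [] line_breaks
    have hfun : (fun (adjusted : List Int) (lb : Int) =>
          if removed_indices.contains lb = true then adjusted
          else adjusted ++ [lb - (List.map (fun r => if r < lb then (1 : Int) else 0)
            (PySem.List.sorted removed_indices (fun x => x))).sum])
        = (fun (out : List Int) (lb : Int) =>
          if (PySem.Set.ofList (PySem.List.sorted removed_indices (fun x => x))).contains lb = true then out
          else out ++ [lb - (pvBisect (PySem.List.sorted removed_indices (fun x => x)) lb 0
            (PySem.List.sorted removed_indices (fun x => x)).length : Int)]) := by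
      funext out lb
      rw [contains_set_eq, shift_eq]
    rw [hfun]
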